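-- pv_equiv track=rewrite | github.com/OlaKrogseth/Scripts | saxs_prosessing.py | sort_frames
-- ===== SOURCE A (Python) =====
-- def sort_frames(frame_list):
--     buffer=[]
--     samples=[]
--     for frame in frame_list:
--         if "buffer" in frame:
--             buffer.append(frame)
--         elif "sample" in frame:
--             samples.append(frame)
--     buffer.sort()
--     samples.sort()
--     return [buffer,samples]
-- ===== SOURCE B (Python) =====
-- def sort_frames(frame_list):
--     # Maintain each bucket in sorted order as we go: insert every frame at its
--     # ordered position (stable insertion after equal elements). No sort() call.
--     def insort(lst, x):
--         i = 0
--         while i < len(lst) and lst[i] <= x: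
--             i += 1
--         lst.insert(i, x)
--     buffer = []
--     samples = []
--     for frame in frame_list:
--         if "buffer" in frame:
--             insort(buffer, frame)
--         elif "sample" in frame:
--             insort(samples, frame)
--     return [buffer, samples]
-- ===== Notes on version B (the rewrite author's own statement) =====
-- stated objective: alternative
-- what changed: B never calls sort(): it keeps each bucket sorted throughout a single pass by inserting every frame at its ordered position (online insertion sort), instead of A's append-then-sort-each-list.
import Mathlib
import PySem

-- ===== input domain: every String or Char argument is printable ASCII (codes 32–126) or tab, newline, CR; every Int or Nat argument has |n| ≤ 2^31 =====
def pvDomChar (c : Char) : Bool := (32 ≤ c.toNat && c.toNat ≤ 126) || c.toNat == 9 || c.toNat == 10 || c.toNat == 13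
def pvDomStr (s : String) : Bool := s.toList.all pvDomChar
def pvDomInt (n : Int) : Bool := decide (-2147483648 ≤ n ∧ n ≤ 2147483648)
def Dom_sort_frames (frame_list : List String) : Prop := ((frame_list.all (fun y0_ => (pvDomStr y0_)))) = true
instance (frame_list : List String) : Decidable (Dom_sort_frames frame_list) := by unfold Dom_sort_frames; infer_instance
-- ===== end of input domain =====

-- B keeps each bucket sorted during one pass by ordered insertion (no sort() call), instead of A's append-then-sort; alternative decomposition, not faster.

-- ===== PORT A =====
def sort_frames (frame_list : List String) : List (List String) :=
  let st := frame_list.foldl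
    (fun (st : List String × List String) frame =>
      if PySem.Str.isIn "buffer" frame then (st.1 ++ [frame], st.2)
      else if PySem.Str.isIn "sample" frame then (st.1, st.2 ++ [frame])
      else st) ([], [])
  [PySem.List.sorted st.1 (fun x => x) false, PySem.List.sorted st.2 (fun x => x) false]

-- ===== PORT B =====
-- port of Source B's insort: linear scan past all elements ≤ x, insert x there
def pvInsort (lst : List String) (x : String) : List String :=
  match lst with
  | [] => [x]
  | y :: ys => if y ≤ x then y :: pvInsort ys x else x :: y :: ys

def sort_frames_alt (frame_list : List String) : List (List String) :=
  let st := frame_list.foldl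
    (fun (st : List String × List String) frame =>
      if PySem.Str.isIn "buffer" frame then (pvInsort st.1 frame, st.2)
      else if PySem.Str.isIn "sample" frame then (st.1, pvInsort st.2 frame)
      else st) ([], [])
  [st.1, st.2]

-- ===== PRECONDITION & SPEC =====
def Spec_sort_frames (frame_list : List String) (out : List (List String)) : Prop := out = sort_frames_alt frame_list
instance (frame_list : List String) (out : List (List String)) : Decidable (Spec_sort_frames frame_list out) := by unfold Spec_sort_frames; infer_instance

-- ===== CLAIM =====
def Claim_equal_sort_frames : Prop := ∀ (frame_list : List String), Dom_sort_frames frame_list → Spec_sort_frames frame_list (sort_frames frame_list)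

-- ===== LEMMAS AND PROOFS =====

-- A's elif loop, with accumulators generalized, is two filters of the input.
theorem sortFrames_foldl_eq_filter (l b s : List String) :
    l.foldl (fun (st : List String × List String) frame =>
      if PySem.Str.isIn "buffer" frame then (st.1 ++ [frame], st.2)
      else if PySem.Str.isIn "sample" frame then (st.1, st.2 ++ [frame])
      else st) (b, s)
    = (b ++ l.filter (fun f => PySem.Str.isIn "buffer" f),
       s ++ l.filter (fun f => PySem.Str.isIn "sample" f && !PySem.Str.isIn "buffer" f)) := by
  induction l generalizing b s with
  | nil => simp
  | cons x xs ih =>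
    rw [List.foldl_cons, List.filter_cons, List.filter_cons]
    by_cases hb : PySem.Str.isIn "buffer" x = true
    · rw [if_pos hb, ih, if_pos hb,
        if_neg (by simp at hb ⊢; simp [hb] : ¬ (PySem.Str.isIn "sample" x && !PySem.Str.isIn "buffer" x) = true)]
      simp
    · by_cases hs : PySem.Str.isIn "sample" x = true
      · rw [if_neg hb, if_pos hs, ih, if_neg hb,
          if_pos (by simp at hb hs ⊢; simp [hb, hs] : (PySem.Str.isIn "sample" x && !PySem.Str.isIn "buffer" x) = true)]
        simp
      · rw [if_neg hb, if_neg hs, ih, if_neg hb,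
          if_neg (by simp at hs ⊢; simp [hs] : ¬ (PySem.Str.isIn "sample" x && !PySem.Str.isIn "buffer" x) = true)]

-- B's loop, with accumulators generalized, is two insort-folds over the filtered input.
theorem sortFramesAlt_foldl_eq_filter (l b s : List String) :
    l.foldl (fun (st : List String × List String) frame =>
      if PySem.Str.isIn "buffer" frame then (pvInsort st.1 frame, st.2)
      else if PySem.Str.isIn "sample" frame then (st.1, pvInsort st.2 frame)
      else st) (b, s)
    = ((l.filter (fun f => PySem.Str.isIn "buffer" f)).foldl pvInsort b,
       (l.filter (fun f => PySem.Str.isIn "sample" f && !PySem.Str.isIn "buffer" f)).foldl pvInsort s) := by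
  induction l generalizing b s with
  | nil => simp
  | cons x xs ih =>
    rw [List.foldl_cons, List.filter_cons, List.filter_cons]
    by_cases hb : PySem.Str.isIn "buffer" x = true
    · rw [if_pos hb, ih, if_pos hb,
        if_neg (by simp at hb ⊢; simp [hb] : ¬ (PySem.Str.isIn "sample" x && !PySem.Str.isIn "buffer" x) = true)]
      simp
    · by_cases hs : PySem.Str.isIn "sample" x = true
      · rw [if_neg hb, if_pos hs, ih, if_neg hb,
          if_pos (by simp at hb hs ⊢; simp [hb, hs] : (PySem.Str.isIn "sample" x && !PySem.Str.isIn "buffer" x) = true)]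
        simp
      · rw [if_neg hb, if_neg hs, ih, if_neg hb,
          if_neg (by simp at hs ⊢; simp [hs] : ¬ (PySem.Str.isIn "sample" x && !PySem.Str.isIn "buffer" x) = true)]

theorem perm_pvInsort (l : List String) (x : String) : (pvInsort l x).Perm (x :: l) := by
  induction l with
  | nil => simp [pvInsort]
  | cons y ys ih =>
    unfold pvInsort
    split_ifs with h
    · exact ((ih.cons y).trans (List.Perm.swap x y ys))
    · exact List.Perm.refl _

theorem mem_pvInsort (l : List String) (x z : String) :
    z ∈ pvInsort l x ↔ z = x ∨ z ∈ l := by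
  rw [(perm_pvInsort l x).mem_iff]; simp

theorem pairwise_pvInsort (l : List String) (x : String)
    (h : l.Pairwise (· ≤ ·)) : (pvInsort l x).Pairwise (· ≤ ·) := by
  induction l with
  | nil => simp [pvInsort]
  | cons y ys ih =>
    rcases List.pairwise_cons.mp h with ⟨hy, hys⟩
    unfold pvInsort
    split_ifs with hle
    · refine List.pairwise_cons.mpr ⟨?_, ih hys⟩
      intro z hz
      rcases (mem_pvInsort ys x z).mp hz with rfl | hz
      · exact hle
      · exact hy z hz
    · refine List.pairwise_cons.mpr ⟨?_, h⟩
      intro z hz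
      have hxy : x ≤ y := le_of_lt (lt_of_not_ge hle)
      rcases List.mem_cons.mp hz with rfl | hz
      · exact hxy
      · exact le_trans hxy (hy z hz)

theorem perm_foldl_pvInsort (xs acc : List String) :
    (xs.foldl pvInsort acc).Perm (acc ++ xs) := by
  induction xs generalizing acc with
  | nil => simp
  | cons x xs ih =>
    rw [List.foldl_cons]
    refine (ih (pvInsort acc x)).trans ?_
    have h1 : (pvInsort acc x ++ xs).Perm ((x :: acc) ++ xs) :=
      (perm_pvInsort acc x).append_right xs
    exact h1.trans (by simpa using (List.perm_middle (a := x) (l₁ := acc) (l₂ := xs)).symm)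

theorem pairwise_foldl_pvInsort (xs acc : List String)
    (h : acc.Pairwise (· ≤ ·)) : (xs.foldl pvInsort acc).Pairwise (· ≤ ·) := by
  induction xs generalizing acc with
  | nil => exact h
  | cons x xs ih => exact ih _ (pairwise_pvInsort acc x h)

-- insertion sort from the empty accumulator IS sorted()
theorem foldl_pvInsort_eq_sorted (xs : List String) :
    xs.foldl pvInsort [] = PySem.List.sorted xs (fun x => x) false := by
  symm
  apply PySem.List.sorted_id_eq_of_perm_of_pairwise
  · simpa using perm_foldl_pvInsort xs []
  · exact pairwise_foldl_pvInsort xs [] (by simp)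

-- ===== VERDICT =====
theorem sort_frames_spec : Claim_equal_sort_frames := by
  intro l _
  unfold Spec_sort_frames sort_frames sort_frames_alt
  simp only [sortFrames_foldl_eq_filter l [] [], sortFramesAlt_foldl_eq_filter l [] [],
    List.nil_append, foldl_pvInsort_eq_sorted]
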